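-- pv_equiv track=rewrite | github.com/rf-iasys/OEIS | OEIS_A000244.py | A000244
-- ===== SOURCE A (Python) =====
-- def A000244(n):
--     marked = []
--     current = 1
--     k = 1
--
--     while len(marked) < n:
--         marked.append(k)
--         k += k + k*current
--         current += current//(k**2)
--
--     return marked
-- ===== SOURCE B (Python) =====
-- def A000244(n):
--     return [3**i for i in range(n)]
-- ===== Notes on version B (the rewrite author's own statement) =====
-- stated objective: idiomatic
-- what changed: B computes each element as the closed-form power 3**i from its index via a range comprehension, instead of A's while-loop that maintains a running term k and an auxiliary 'current' variable updated with a floor division each iteration.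
import Mathlib
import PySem

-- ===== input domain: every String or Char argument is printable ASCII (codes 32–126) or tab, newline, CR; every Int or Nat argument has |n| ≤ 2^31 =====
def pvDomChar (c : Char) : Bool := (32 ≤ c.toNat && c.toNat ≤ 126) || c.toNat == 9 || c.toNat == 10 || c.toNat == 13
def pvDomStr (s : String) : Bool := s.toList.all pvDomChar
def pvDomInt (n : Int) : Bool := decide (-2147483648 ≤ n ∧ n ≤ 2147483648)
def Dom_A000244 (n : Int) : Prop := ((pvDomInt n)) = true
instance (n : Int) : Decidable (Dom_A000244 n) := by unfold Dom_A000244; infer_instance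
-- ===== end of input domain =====

-- B replaces A's running-product while loop (with its auxiliary 'current' variable) by an
-- idiomatic range comprehension computing each element as the closed-form power 3**i.


-- ===== PORT A =====
-- the while loop of A: state (marked, k, current); runs while len(marked) < n
def A000244loop (n : Int) (marked : List Int) (k current : Int) : List Int :=
  if h : (marked.length : Int) < n then
    A000244loop n (marked ++ [k]) (k + (k + k * current))
      (current + PySem.Int.floordiv current ((k + (k + k * current)) ^ 2))
  else marked
termination_by (n - marked.length).toNat
decreasing_by simp; omega

def A000244 (n : Int) : List Int := A000244loop n [] 1 1

-- ===== PORT B =====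
def A000244_alt (n : Int) : List Int :=
  (PySem.List.pyRange 0 n 1).map (fun i => 3 ^ i.toNat)

-- ===== PRECONDITION & SPEC =====
def Spec_A000244 (n : Int) (out : List Int) : Prop := out = A000244_alt n
instance (n : Int) (out : List Int) : Decidable (Spec_A000244 n out) := by unfold Spec_A000244; infer_instance

-- ===== CLAIM (what is proved, stated in full; the proofs are below) =====
def Claim_equal_A000244 : Prop := ∀ (n : Int), Dom_A000244 n → Spec_A000244 n (A000244 n)

-- ===== LEMMAS AND PROOFS =====

-- Invariant: started from k = 3^j with current = 1 and |marked| = j, the loop appends the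
-- remaining powers 3^j, 3^(j+1), …
theorem A000244loop_inv (n : Int) (j : Nat) (marked : List Int) (hlen : marked.length = j) :
    A000244loop n marked (3 ^ j) 1 =
      marked ++ (List.range (n - j).toNat).map (fun i => 3 ^ (j + i)) := by
  generalize hm : (n - j).toNat = m
  induction m generalizing j marked with
  | zero =>
    rw [A000244loop]
    have : ¬ ((marked.length : Int) < n) := by omega
    simp [this]
  | succ m ih =>
    rw [A000244loop]
    have hlt : (marked.length : Int) < n := by omega
    simp only [hlt, dif_pos]
    have hk : (3:Int) ^ j + ((3:Int) ^ j + (3:Int) ^ j * 1) = 3 ^ (j + 1) := by ring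
    have hc : (1:Int) + PySem.Int.floordiv 1 (((3:Int) ^ (j+1)) ^ 2) = 1 := by
      have h3 : (3:Int) ≤ 3 ^ (j+1) := le_self_pow₀ (by norm_num) (by omega)
      rw [PySem.Int.floordiv_eq_ediv_of_pos (by nlinarith)]
      rw [Int.ediv_eq_zero_of_lt (by norm_num) (by nlinarith)]
      ring
    rw [hk, hc, ih (j + 1) (marked ++ [3 ^ j]) (by simp [hlen]) (by omega)]
    simp only [List.append_assoc, List.singleton_append]
    congr 1
    rw [List.range_succ_eq_map]
    simp only [List.map_cons, List.map_map, Nat.add_zero, List.cons.injEq]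
    exact ⟨trivial, List.map_congr_left (fun i _ => by
      simp only [Function.comp_apply]
      rw [show j + (i + 1) = j + 1 + i from by omega])⟩

theorem pyRange_zero_eq (n : Int) :
    PySem.List.pyRange 0 n 1 = (List.range n.toNat).map (fun k : Nat => (k : Int)) := by
  by_cases h : 0 ≤ n
  · have hn : n = (n.toNat : Int) := by omega
    rw [hn, PySem.List.pyRange_zero_natCast]
    simp
    rw [max_eq_left h]
  · simp only [PySem.List.pyRange]
    simp [Int.toNat_of_nonpos (by omega : n ≤ 0)]

-- ===== VERDICT (by name: the statement is the Claim_ definition above) =====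
theorem A000244_spec : Claim_equal_A000244 := by
  intro n _
  unfold Spec_A000244 A000244 A000244_alt
  have h0 := A000244loop_inv n 0 [] rfl
  norm_num at h0
  rw [pyRange_zero_eq, h0, List.map_map]
  exact List.map_congr_left (fun i _ => by simp)
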